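-- pv_equiv track=rewrite | github.com/CGATOxford/cgat | CGAT/scripts/fasta2bed.py | gapped_regions
-- ===== SOURCE A (Python) =====
-- def gapped_regions(seq, gap_chars):
--     '''iterator yielding gapped regions in seq.'''
--     is_gap = seq[0] in gap_chars
--     last = 0
--     size = len(seq)
--     for x, c in enumerate(seq):
--         if c in gap_chars:
--             if not is_gap:
--                 last = x
--                 is_gap = True
--         else:
--             if is_gap:
--                 yield(last, x)
--                 last = x
--                 is_gap = False
--     if is_gap:
--         yield last, size
-- ===== SOURCE B (Python) =====
-- def gapped_regions(seq, gap_chars):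
--     '''iterator yielding gapped regions in seq.'''
--     i, n = 0, len(seq)
--     while i < n:
--         j = i
--         is_gap_run = seq[i] in gap_chars
--         while j < n and (seq[j] in gap_chars) == is_gap_run:
--             j += 1
--         if is_gap_run:
--             yield (i, j)
--         i = j
-- ===== Notes on version B (the rewrite author's own statement) =====
-- stated objective: alternative
-- what changed: Replaces A's per-character is_gap/last state machine with a run-scanning two-pointer loop that finds each maximal run of same gap-status characters and yields the gap runs directly.
import Mathlib
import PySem

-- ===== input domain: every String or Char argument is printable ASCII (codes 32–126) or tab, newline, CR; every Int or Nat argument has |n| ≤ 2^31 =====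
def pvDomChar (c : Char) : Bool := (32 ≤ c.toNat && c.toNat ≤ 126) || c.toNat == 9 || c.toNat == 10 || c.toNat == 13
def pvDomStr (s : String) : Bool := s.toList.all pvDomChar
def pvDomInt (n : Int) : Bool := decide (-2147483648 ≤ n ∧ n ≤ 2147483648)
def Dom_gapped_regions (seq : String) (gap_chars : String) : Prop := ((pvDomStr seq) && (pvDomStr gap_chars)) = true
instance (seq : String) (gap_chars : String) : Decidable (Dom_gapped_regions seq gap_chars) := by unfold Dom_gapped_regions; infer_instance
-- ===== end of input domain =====

-- B re-implements A's per-character state machine as a run-scanning two-pointer loop;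
-- equivalence is about the yielded regions (both Pythons are generators, compared as lists).

-- ===== PORT A =====
-- one loop step: state (is_gap, last, acc), input (x, c)
def pvStepA (gl : List Char) (st : Bool × Int × List (Int × Int)) (p : Int × Char) :
    Bool × Int × List (Int × Int) :=
  let (is_gap, last, acc) := st
  let (x, c) := p
  if gl.contains c then
    if !is_gap then (true, x, acc) else st
  else
    if is_gap then (false, last, acc ++ [(last, x)]) else st

def gapped_regions (seq : String) (gap_chars : String) : List (Int × Int) :=
  match seq.toList with
  | [] => []        -- seq[0] raises IndexError here; excluded by Pre_gapped_regions
  | c0 :: _ =>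
    let gl := gap_chars.toList
    let size : Int := (seq.toList.length : Int)
    let st := (PySem.List.enumerate seq.toList 0).foldl (pvStepA gl)
                (gl.contains c0, (0 : Int), ([] : List (Int × Int)))
    if st.1 then st.2.2 ++ [(st.2.1, size)] else st.2.2

-- ===== PORT B =====
-- outer while loop of Source B: scan the maximal run starting at pos, yield it if it is a gap run
def pvLoopB (gl : List Char) (pos : Int) (l : List Char) : List (Int × Int) :=
  match l with
  | [] => []
  | c :: t =>
    let k := gl.contains c
    let run := (c :: t).takeWhile (fun d => gl.contains d == k)
    let rest := (c :: t).dropWhile (fun d => gl.contains d == k)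
    let n : Int := (run.length : Int)
    (if k then [(pos, pos + n)] else []) ++ pvLoopB gl (pos + n) rest
termination_by l.length
decreasing_by
  simp only [List.dropWhile_cons, beq_self_eq_true, if_pos]
  exact Nat.lt_succ_of_le (List.length_dropWhile_le _ _)

def gapped_regions_alt (seq : String) (gap_chars : String) : List (Int × Int) :=
  pvLoopB gap_chars.toList 0 seq.toList

-- ===== PRECONDITION & SPEC =====
-- Pre_ excludes only the empty sequence, on which A raises IndexError at seq[0].
def Pre_gapped_regions (seq : String) (gap_chars : String) : Prop := seq ≠ ""
instance (seq : String) (gap_chars : String) : Decidable (Pre_gapped_regions seq gap_chars) := by unfold Pre_gapped_regions; infer_instance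
def pvWitness_gapped_regions : String × String := ("AC--G-T", "-.")

def Spec_gapped_regions (seq : String) (gap_chars : String) (out : List (Int × Int)) : Prop := out = gapped_regions_alt seq gap_chars
instance (seq : String) (gap_chars : String) (out : List (Int × Int)) : Decidable (Spec_gapped_regions seq gap_chars out) := by unfold Spec_gapped_regions; infer_instance

-- ===== CLAIM (what is proved, stated in full; the proofs are below) =====
def Claim_equal_gapped_regions : Prop := ∀ (seq : String) (gap_chars : String), Dom_gapped_regions seq gap_chars → Pre_gapped_regions seq gap_chars → Spec_gapped_regions seq gap_chars (gapped_regions seq gap_chars)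

-- ===== LEMMAS AND PROOFS =====

-- proof-side machine: state = optional start of the currently open gap run
def pvMach (gl : List Char) (st : Option Int) (pos : Int) : List Char → List (Int × Int)
  | [] => match st with | some last => [(last, pos)] | none => []
  | c :: t =>
    if gl.contains c then
      match st with
      | some _ => pvMach gl st (pos + 1) t
      | none => pvMach gl (some pos) (pos + 1) t
    else
      match st with
      | some last => (last, pos) :: pvMach gl none (pos + 1) t
      | none => pvMach gl none (pos + 1) t

theorem pvFoldA_mach (gl : List Char) (l : List Char) :
    ∀ (pos : Int) (g : Bool) (last : Int) (acc : List (Int × Int)),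
    (let st := (PySem.List.enumerate l pos).foldl (pvStepA gl) (g, last, acc);
     if st.1 then st.2.2 ++ [(st.2.1, pos + (l.length : Int))] else st.2.2)
    = acc ++ pvMach gl (if g then some last else none) pos l := by
  induction l with
  | nil =>
    intro pos g last acc
    cases g <;> simp [PySem.List.enumerate, pvMach]
  | cons c t ih =>
    intro pos g last acc
    simp only [PySem.List.enumerate_cons, List.foldl_cons]
    have harr : pos + ((t.length : Int) + 1) = pos + 1 + (t.length : Int) := by ring
    by_cases hc : c ∈ gl
    · cases g with
      | true =>
        have h := ih (pos + 1) true last acc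
        simpa [pvStepA, pvMach, hc, harr] using h
      | false =>
        have h := ih (pos + 1) true pos acc
        simpa [pvStepA, pvMach, hc, harr] using h
    · cases g with
      | true =>
        have h := ih (pos + 1) false last (acc ++ [(last, pos)])
        simpa [pvStepA, pvMach, hc, harr] using h
      | false =>
        have h := ih (pos + 1) false last acc
        simpa [pvStepA, pvMach, hc, harr] using h

-- consuming a run of gap characters leaves an open gap unchanged
theorem pvMach_gap_run (gl : List Char) (run : List Char) :
    ∀ (rest : List Char) (last pos : Int), (∀ c ∈ run, gl.contains c = true) →
    pvMach gl (some last) pos (run ++ rest) = pvMach gl (some last) (pos + (run.length : Int)) rest := by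
  induction run with
  | nil => intro rest last pos _; simp
  | cons c t ih =>
    intro rest last pos h
    have hc : gl.contains c = true := h c (List.mem_cons_self ..)
    simp only [List.cons_append, pvMach, hc, if_pos]
    rw [ih rest last (pos + 1) (fun d hd => h d (List.mem_cons_of_mem _ hd))]
    congr 1
    simp only [List.length_cons]
    push_cast
    ring

-- consuming a run of non-gap characters emits nothing
theorem pvMach_nongap_run (gl : List Char) (run : List Char) :
    ∀ (rest : List Char) (pos : Int), (∀ c ∈ run, gl.contains c = false) →
    pvMach gl none pos (run ++ rest) = pvMach gl none (pos + (run.length : Int)) rest := by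
  induction run with
  | nil => intro rest pos _; simp
  | cons c t ih =>
    intro rest pos h
    have hc : gl.contains c = false := h c (List.mem_cons_self ..)
    simp only [List.cons_append, pvMach, hc, Bool.false_eq_true, if_neg, not_false_iff]
    rw [ih rest (pos + 1) (fun d hd => h d (List.mem_cons_of_mem _ hd))]
    congr 1
    simp only [List.length_cons]
    push_cast
    ring

theorem pvDropWhile_head_false {p : Char → Bool} {l : List Char} {d : Char} {r : List Char}
    (h : l.dropWhile p = d :: r) : p d = false := by
  induction l with
  | nil => simp at h
  | cons c t ih =>
    by_cases hc : p c = true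
    · simp [List.dropWhile_cons, hc] at h; exact ih h
    · simp [List.dropWhile_cons, hc] at h
      rcases h with ⟨h1, _⟩
      rw [← h1]
      exact Bool.eq_false_iff.mpr hc

theorem pvMach_eq_loopB (gl : List Char) :
    ∀ (n : Nat) (l : List Char), l.length ≤ n → ∀ (pos : Int),
    pvMach gl none pos l = pvLoopB gl pos l := by
  intro n
  induction n with
  | zero =>
    intro l hl pos
    rw [List.length_eq_zero_iff.mp (Nat.le_zero.mp hl)]
    simp [pvMach, pvLoopB]
  | succ n ih =>
    intro l hl pos
    match l with
    | [] => simp [pvMach, pvLoopB]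
    | c :: t =>
      rw [pvLoopB]
      set k := gl.contains c with hk
      have hpc : (fun d => gl.contains d == k) c = true := by simp [hk]
      set p : Char → Bool := fun d => gl.contains d == k with hp
      have htw : (c :: t).takeWhile p = c :: t.takeWhile p := by
        simp [List.takeWhile_cons, hpc]
      have hdw : (c :: t).dropWhile p = t.dropWhile p := by
        simp [List.dropWhile_cons, hpc]
      have hsplit : t = t.takeWhile p ++ t.dropWhile p := (List.takeWhile_append_dropWhile ..).symm
      have htlen : (t.dropWhile p).length ≤ n := by
        have h1 := List.length_dropWhile_le p t
        simp only [List.length_cons] at hl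
        omega
      have hmemtw : ∀ d ∈ t.takeWhile p, gl.contains d = k := by
        intro d hd
        have := List.mem_takeWhile_imp hd
        simpa [hp] using this
      cases hkk : k with
      | true =>
        have hcg : c ∈ gl := by simpa using hk.symm.trans hkk
        have hstep : pvMach gl none pos (c :: t) = pvMach gl (some pos) (pos + 1) t := by
          simp [pvMach, hcg]
        rw [hstep, hdw]
        conv_lhs => rw [hsplit]
        rw [pvMach_gap_run gl _ _ _ _ (fun d hd => by rw [hmemtw d hd, hkk])]
        have harith : pos + 1 + ((t.takeWhile p).length : Int)
            = pos + (((c :: t).takeWhile p).length : Int) := by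
          rw [htw]; simp only [List.length_cons]; push_cast; ring
        rw [harith]
        set q : Int := pos + (((c :: t).takeWhile p).length : Int) with hq
        match hrest : t.dropWhile p with
        | [] => simp [pvMach, pvLoopB, hkk]
        | d :: r =>
          have hd : d ∉ gl := by
            have h0 := pvDropWhile_head_false hrest
            simpa [hp, hkk] using h0
          have h1 : pvMach gl (some pos) q (d :: r) = (pos, q) :: pvMach gl none q (d :: r) := by
            simp [pvMach, hd]
          rw [h1, ih (d :: r) (hrest ▸ htlen) q]
          simp [hkk]
      | false =>
        have hcg : c ∉ gl := by simpa using hk.symm.trans hkk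
        have hstep : pvMach gl none pos (c :: t) = pvMach gl none (pos + 1) t := by
          simp [pvMach, hcg]
        rw [hstep, hdw]
        conv_lhs => rw [hsplit]
        rw [pvMach_nongap_run gl _ _ _ (fun d hd => by rw [hmemtw d hd, hkk])]
        have harith : pos + 1 + ((t.takeWhile p).length : Int)
            = pos + (((c :: t).takeWhile p).length : Int) := by
          rw [htw]; simp only [List.length_cons]; push_cast; ring
        rw [harith, ih _ htlen]
        simp [hkk]

-- ===== VERDICT (by name: the statement is the Claim_ definition above) =====
theorem gapped_regions_spec : Claim_equal_gapped_regions := by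
  intro seq gap_chars _ hpre
  unfold Spec_gapped_regions gapped_regions gapped_regions_alt
  match hs : seq.toList with
  | [] =>
    exact absurd (String.toList_eq_nil_iff.mp hs) hpre
  | c0 :: t =>
    simp only
    have h := pvFoldA_mach gap_chars.toList (c0 :: t) 0
        (gap_chars.toList.contains c0) 0 []
    simp only [zero_add, List.nil_append] at h
    rw [h]
    have hone : pvMach gap_chars.toList
        (if gap_chars.toList.contains c0 then some 0 else none) 0 (c0 :: t)
        = pvMach gap_chars.toList none 0 (c0 :: t) := by
      by_cases hc : c0 ∈ gap_chars.toList
      · simp [pvMach, hc]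
      · simp [pvMach, hc]
    rw [hone, pvMach_eq_loopB gap_chars.toList (c0 :: t).length _ le_rfl 0]
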